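-- pv_equiv track=rewrite | github.com/YarGorbunov/Python | lab1/task2-4.py | check
-- ===== SOURCE A (Python) =====
-- def check(string):
--     s = string
--     i = 0
--     while i < len(s):
--         #if i >= len(s): break
--         if s[i] < "a" or s[i] > "z":
--             s = s[:i] + s[i + 1:]
--             i -= 1
--         i += 1
--     for i in range(1,len(s)):
--         if s[i-1] > s[i]:
--             return False
--     return True
-- ===== SOURCE B (Python) =====
-- def check(string):
--     filtered = [c for c in string if 'a' <= c <= 'z']
--     return filtered == sorted(filtered)
-- ===== Notes on version B (the rewrite author's own statement) =====
-- stated objective: simpler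
-- what changed: Replaces A's in-place character-deletion while-loop (repeated string slicing) plus pairwise adjacent scan with a filter comprehension and a sorted-copy comparison.
import Mathlib
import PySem

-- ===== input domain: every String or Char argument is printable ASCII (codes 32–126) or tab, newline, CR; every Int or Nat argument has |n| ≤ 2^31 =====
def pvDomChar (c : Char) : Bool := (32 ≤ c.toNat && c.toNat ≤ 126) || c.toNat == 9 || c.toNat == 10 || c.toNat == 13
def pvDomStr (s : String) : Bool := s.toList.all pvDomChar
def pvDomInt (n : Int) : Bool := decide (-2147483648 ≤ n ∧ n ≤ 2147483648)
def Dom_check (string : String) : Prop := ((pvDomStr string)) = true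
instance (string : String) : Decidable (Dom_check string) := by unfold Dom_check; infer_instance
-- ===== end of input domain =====

-- B replaces A's in-place deletion loop + pairwise scan with a filter and a sorted-copy comparison (objective: simpler).

-- ===== PORT A =====
-- the while-loop: deletes s[i] when it is not a lowercase letter (i -= 1; i += 1 leaves i unchanged),
-- otherwise advances i; s[:i] + s[i+1:] = take i ++ drop (i+1)
def checkDelLoop (s : List Char) (i : Nat) : List Char :=
  if h : i < s.length then
    if s[i] < 'a' ∨ 'z' < s[i] then
      checkDelLoop (s.take i ++ s.drop (i + 1)) i
    else
      checkDelLoop s (i + 1)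
  else s
termination_by s.length - i
decreasing_by
  · simp_all [List.length_take, List.length_drop]; omega
  · omega

-- the for-loop over range(1, len(s)): returns False on the first descent
def checkScan (s : List Char) (i : Nat) : Bool :=
  if h : i < s.length then
    if s[i - 1]! > s[i] then false else checkScan s (i + 1)
  else true
termination_by s.length - i

def check (string : String) : Bool :=
  checkScan (checkDelLoop string.toList 0) 1

-- ===== PORT B =====
def check_alt (string : String) : Bool :=
  let filtered := string.toList.filter (fun c => 'a' ≤ c ∧ c ≤ 'z')
  filtered == PySem.List.sorted filtered (fun c => c) false

-- ===== PRECONDITION & SPEC =====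
def Spec_check (string : String) (out : Bool) : Prop := out = check_alt string
instance (string : String) (out : Bool) : Decidable (Spec_check string out) := by unfold Spec_check; infer_instance

-- ===== CLAIM (what is proved, stated in full; the proofs are below) =====
def Claim_equal_check : Prop := ∀ (string : String), Dom_check string → Spec_check string (check string)

-- ===== LEMMAS AND PROOFS =====

def isLc (c : Char) : Bool := 'a' ≤ c ∧ c ≤ 'z'

-- the deletion loop, on a list whose first i characters are lowercase, filters the rest
theorem checkDelLoop_filter (s : List Char) (i : Nat)
    (hpre : ∀ j (h : j < i) (hj : j < s.length), isLc s[j]) :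
    checkDelLoop s i = s.take i ++ (s.drop i).filter isLc := by
  rw [checkDelLoop]
  split
  · rename_i h
    by_cases hc : s[i] < 'a' ∨ 'z' < s[i]
    · rw [if_pos hc]
      have hlc : isLc s[i] = false := by
        simp only [isLc, Bool.decide_and, Bool.and_eq_false_iff, decide_eq_false_iff_not, not_le]
        rcases hc with hc | hc
        · exact Or.inl hc
        · exact Or.inr hc
      have ih := checkDelLoop_filter (s.take i ++ s.drop (i + 1)) i (by
        intro j hj hj'
        have hjl : j < s.length := by omega
        have hjt : j < (s.take i).length := by simp; omega
        have hget : (s.take i ++ s.drop (i + 1))[j] = s[j] := by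
          rw [List.getElem_append_left hjt, List.getElem_take]
        rw [hget]; exact hpre j hj hjl)
      rw [ih]
      have h1 : (s.take i ++ s.drop (i + 1)).take i = s.take i := by
        rw [List.take_append_of_le_length (by simp; omega)]
        simp [List.take_take]
      have h2 : (s.take i ++ s.drop (i + 1)).drop i = s.drop (i + 1) := by
        rw [List.drop_append_of_le_length (by simp; omega)]
        simp
      rw [h1, h2]
      have hdrop : s.drop i = s[i] :: s.drop (i + 1) := List.drop_eq_getElem_cons h
      rw [hdrop, List.filter_cons_of_neg (by simp [hlc])]
    · rw [if_neg hc]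
      have hnc := hc
      rw [not_or, not_lt, not_lt] at hnc
      have hlc : isLc s[i] = true := by
        simp only [isLc, Bool.decide_and, Bool.and_eq_true, decide_eq_true_eq]
        exact ⟨hnc.1, hnc.2⟩
      have ih := checkDelLoop_filter s (i + 1) (by
        intro j hj hj'
        rcases Nat.lt_succ_iff_lt_or_eq.mp hj with hj | rfl
        · exact hpre j hj hj'
        · exact hlc)
      rw [ih]
      have hdrop : s.drop i = s[i] :: s.drop (i + 1) := List.drop_eq_getElem_cons h
      have htake : s.take (i + 1) = s.take i ++ [s[i]] := by
        rw [List.take_add_one]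
        simp [List.getElem?_eq_getElem h]
      rw [hdrop, List.filter_cons_of_pos hlc, htake, List.append_assoc,
        List.singleton_append]
  · rename_i h
    rw [not_lt] at h
    simp [List.take_of_length_le h, List.drop_of_length_le h]
termination_by s.length - i
decreasing_by
  · simp_all [List.length_take, List.length_drop]; omega
  · omega

theorem checkDelLoop_eq (s : List Char) :
    checkDelLoop s 0 = s.filter isLc := by
  simpa using checkDelLoop_filter s 0 (by intro j h; omega)

-- the scan from index i returns true iff s is stepwise ascending from position i-1 on
theorem checkScan_true_iff (s : List Char) (i : Nat) (hi : 1 ≤ i) :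
    checkScan s i = true ↔ ∀ j, i ≤ j → (hj : j < s.length) → s[j - 1]! ≤ s[j] := by
  rw [checkScan]
  split
  · rename_i h
    by_cases hc : s[i - 1]! > s[i]
    · rw [if_pos hc]
      simp only [Bool.false_eq_true, false_iff, not_forall]
      exact ⟨i, le_refl i, h, by exact not_le.mpr hc⟩
    · rw [if_neg hc]
      rw [checkScan_true_iff s (i + 1) (by omega)]
      constructor
      · intro hall j hij hj
        rcases Nat.eq_or_lt_of_le hij with rfl | hlt
        · exact not_lt.mp hc
        · exact hall j hlt hj
      · intro hall j hij hj
        exact hall j (by omega) hj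
  · rename_i h
    rw [not_lt] at h
    simp only [true_iff]
    intro j hij hj; omega
termination_by s.length - i

theorem scan_iff_pairwise (s : List Char) :
    checkScan s 1 = true ↔ s.Pairwise (· ≤ ·) := by
  rw [checkScan_true_iff s 1 (le_refl 1), ← List.isChain_iff_pairwise,
    List.isChain_iff_getElem]
  constructor
  · intro h i hi
    have h2 := h (i + 1) (by omega) (by omega)
    have heq : s[i + 1 - 1]! = s[i]'(by omega) := by
      simp [List.getElem!_eq_getElem?_getD, List.getElem?_eq_getElem (show i < s.length by omega)]
    rwa [heq] at h2
  · intro h j h1 hj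
    have hjm : j - 1 < s.length := by omega
    have heq : s[j - 1]! = s[j - 1] := by
      simp [List.getElem!_eq_getElem?_getD, List.getElem?_eq_getElem hjm]
    rw [heq]
    have := h (j - 1) (by omega)
    have hidx : j - 1 + 1 = j := by omega
    simpa [hidx] using this

theorem check_alt_eq (string : String) : check_alt string =
    ((string.toList.filter isLc) ==
      PySem.List.sorted (string.toList.filter isLc) (fun c => c)) := rfl

theorem check_spec : Claim_equal_check := by
  intro string _
  unfold Spec_check check
  rw [checkDelLoop_eq, check_alt_eq]
  set f := string.toList.filter isLc with hf
  have hpf : f.Pairwise (· ≤ ·) ↔ checkScan f 1 = true := (scan_iff_pairwise f).symm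
  by_cases hp : f.Pairwise (· ≤ ·)
  · rw [hpf.mp hp, PySem.List.sorted_eq_self_of_pairwise f (fun c => c) (by simpa using hp)]
    simp
  · have hfalse : checkScan f 1 = false :=
      Bool.eq_false_iff.mpr (fun h => hp (hpf.mpr h))
    have hne : f ≠ PySem.List.sorted f (fun c => c) false := by
      intro heq
      apply hp
      have hsp := PySem.List.sorted_pairwise (xs := f) (key := fun c : Char => c)
      rw [← heq] at hsp
      simpa using hsp
    rw [hfalse]
    symm
    rw [beq_eq_false_iff_ne]
    exact hne
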